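-- pv_equiv track=rewrite | github.com/rogerfiske/visualizer | src/predictor/filters.py | decade_group_count
-- ===== SOURCE A (Python) =====
-- from typing import List, Dict, Tuple, Set, Optional, Callable
--
-- def get_decades(ticket: List[int]) -> List[int]:
--     """Helper: Get decade for each number (0=1-9, 1=10-19, 2=20-29, 3=30-39)."""
--     return [n // 10 for n in ticket]
--
-- def decade_group_count(ticket: List[int]) -> int:
--     """Filter 24: Count of consecutive decade groups."""
--     decades = sorted(set(get_decades(ticket)))
--     if not decades:
--         return 0
--     groups = 1
--     for i in range(1, len(decades)):
--         if decades[i] != decades[i-1] + 1: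
--             groups += 1
--     return groups
-- ===== SOURCE B (Python) =====
-- def decade_group_count(ticket):
--     s = {n // 10 for n in ticket}
--     return sum(1 for d in s if d - 1 not in s)
-- ===== Notes on version B (the rewrite author's own statement) =====
-- stated objective: simpler
-- what changed: Counts runs of consecutive decades as the number of decades whose predecessor decade is absent from the set, replacing A's sort of the decade set and adjacent-gap scan over the sorted list.
import Mathlib
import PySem

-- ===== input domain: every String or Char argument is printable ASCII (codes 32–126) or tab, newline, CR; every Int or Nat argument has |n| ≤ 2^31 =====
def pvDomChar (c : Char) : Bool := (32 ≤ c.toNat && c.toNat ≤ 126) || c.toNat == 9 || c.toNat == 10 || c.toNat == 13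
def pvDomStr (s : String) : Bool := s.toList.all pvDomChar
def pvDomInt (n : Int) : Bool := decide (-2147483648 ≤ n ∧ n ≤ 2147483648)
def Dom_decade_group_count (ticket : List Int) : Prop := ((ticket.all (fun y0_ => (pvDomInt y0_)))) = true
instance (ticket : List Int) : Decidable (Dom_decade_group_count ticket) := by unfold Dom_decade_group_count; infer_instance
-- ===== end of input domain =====

-- B counts decades whose predecessor decade is absent from the decade set (run starts),
-- replacing A's sort of the decade set and adjacent-gap scan; objective: simpler.


-- ===== PORT A =====
def get_decades (ticket : List Int) : List Int :=
  ticket.map (fun n => PySem.Int.floordiv n 10)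

def decade_group_count (ticket : List Int) : Int :=
  let decades := PySem.List.sorted (PySem.Set.ofList (get_decades ticket)) (fun x => x) false
  if decades = [] then 0
  else
    (PySem.List.pyRange 1 (decades.length : Int) 1).foldl
      (fun groups i =>
        if PySem.List.pyGetD decades i 0 ≠ PySem.List.pyGetD decades (i - 1) 0 + 1 then groups + 1
        else groups) 1

-- ===== PORT B =====
def decade_group_count_alt (ticket : List Int) : Int :=
  let s : PySem.Set Int := PySem.Set.ofList (ticket.map (fun n => PySem.Int.floordiv n 10))
  s.foldl (fun acc d => if !(PySem.Set.contains s (d - 1)) then acc + 1 else acc) 0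

-- ===== PRECONDITION & SPEC =====
def Spec_decade_group_count (ticket : List Int) (out : Int) : Prop := out = decade_group_count_alt ticket
instance (ticket : List Int) (out : Int) : Decidable (Spec_decade_group_count ticket out) := by unfold Spec_decade_group_count; infer_instance

-- ===== CLAIM (what is proved, stated in full; the proofs are below) =====
def Claim_equal_decade_group_count : Prop := ∀ (ticket : List Int), Dom_decade_group_count ticket → Spec_decade_group_count ticket (decade_group_count ticket)

-- ===== LEMMAS AND PROOFS =====

-- number of "breaks" (adjacent pair not consecutive) in the list a :: t
def adjN : Int → List Int → Nat
  | _, [] => 0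
  | a, b :: t => (if b = a + 1 then 0 else 1) + adjN b t

theorem pyGetD_shift (x : Int) (xs : List Int) (i : Int) (hi : 0 ≤ i) (d : Int) :
    PySem.List.pyGetD (x :: xs) (i + 1) d = PySem.List.pyGetD xs i d := by
  obtain ⟨k, rfl⟩ := Int.eq_ofNat_of_zero_le hi
  have : ((k:Int) + 1) = ((k+1 : Nat) : Int) := by push_cast; ring
  rw [this, PySem.List.pyGetD_natCast, PySem.List.pyGetD_natCast]
  simp

theorem pyGetD_zero (x : Int) (xs : List Int) (d : Int) :
    PySem.List.pyGetD (x :: xs) 0 d = x := by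
  have : (0:Int) = ((0:Nat):Int) := by norm_num
  rw [this, PySem.List.pyGetD_natCast]; simp

-- A's index loop over the sorted distinct decade list counts exactly the adjacent breaks
theorem countP_pyRange_adj (t : List Int) : ∀ a : Int,
    (PySem.List.pyRange 1 (((a :: t).length : Int)) 1).countP
      (fun i => decide (¬ PySem.List.pyGetD (a :: t) i 0 = PySem.List.pyGetD (a :: t) (i - 1) 0 + 1))
      = adjN a t := by
  induction t with
  | nil => intro a; simp [PySem.List.pyRange_one_eq_nil, adjN]
  | cons b t ih =>
    intro a
    have hlen : (((a :: b :: t).length : Int)) = (t.length : Int) + 2 := by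
      simp; ring
    rw [hlen, PySem.List.pyRange_one_cons (by omega), List.countP_cons]
    have h1 : PySem.List.pyGetD (a :: b :: t) 1 0 = b := by
      have h := pyGetD_shift a (b :: t) 0 le_rfl 0
      norm_num at h
      rw [h]
    have h0 : PySem.List.pyGetD (a :: b :: t) (1 - 1) 0 = a := by
      norm_num [pyGetD_zero]
    rw [PySem.List.pyRange_one]
    have htn : (((t.length:Int) + 2) - (1+1)).toNat = t.length := by omega
    rw [htn, List.countP_map]
    have hIH := ih b
    rw [PySem.List.pyRange_one] at hIH
    have htn' : ((((b :: t).length : Int)) - 1).toNat = t.length := by simp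
    rw [htn', List.countP_map] at hIH
    have hshift : (List.range t.length).countP
        ((fun i => decide (¬ PySem.List.pyGetD (a :: b :: t) i 0 = PySem.List.pyGetD (a :: b :: t) (i - 1) 0 + 1)) ∘ (fun k : Nat => (1:Int)+1 + (k:Int)))
        = (List.range t.length).countP
        ((fun i => decide (¬ PySem.List.pyGetD (b :: t) i 0 = PySem.List.pyGetD (b :: t) (i - 1) 0 + 1)) ∘ (fun k : Nat => (1:Int) + (k:Int))) := by
      apply List.countP_congr
      intro k _
      simp only [Function.comp_apply, decide_eq_true_eq]
      have eA : (1:Int)+1 + (k:Int) = ((k:Int)+1) + 1 := by ring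
      have eB : ((k:Int)+1) + 1 - 1 = (k:Int) + 1 := by ring
      have eC : (1:Int) + (k:Int) = (k:Int) + 1 := by ring
      have eD : (k:Int) + 1 - 1 = (k:Int) := by ring
      rw [eA, eB, eC,
        pyGetD_shift a (b :: t) ((k:Int)+1) (by positivity) 0,
        pyGetD_shift b t (k:Int) (by positivity) 0, eD,
        pyGetD_shift a (b :: t) (k:Int) (by positivity) 0]
    rw [hshift, hIH, h1, h0]
    simp only [adjN]
    by_cases hb : b = a + 1
    · simp [hb]
    · simp [hb]
      omega

-- B's run-start count on a strictly increasing list a :: t is 1 + breaks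
theorem countP_starts (t : List Int) : ∀ a : Int,
    (a :: t).Pairwise (· < ·) →
    (a :: t).countP (fun d => !((a :: t).contains (d - 1))) = 1 + adjN a t := by
  induction t with
  | nil =>
    intro a _
    simp [adjN, List.contains_eq_mem]
  | cons b t ih =>
    intro a h
    have hab : a < b := (List.pairwise_cons.1 h).1 b (by simp)
    have h' : (b :: t).Pairwise (· < ·) := (List.pairwise_cons.1 h).2
    have hbt : ∀ x ∈ t, b < x := (List.pairwise_cons.1 h').1
    have pa : ¬ ((a - 1) ∈ (a :: b :: t)) := by
      simp only [List.mem_cons]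
      rintro (e | e | e)
      · omega
      · omega
      · exact absurd (hbt _ e) (by omega)
    have pb : ((b - 1) ∈ (a :: b :: t)) ↔ b = a + 1 := by
      simp only [List.mem_cons]
      constructor
      · rintro (e | e | e)
        · omega
        · omega
        · exact absurd (hbt _ e) (by omega)
      · intro e; left; omega
    have pt : ∀ d ∈ t, ((d - 1) ∈ (a :: b :: t)) ↔ ((d - 1) ∈ (b :: t)) := by
      intro d hd
      have hbd : b < d := hbt d hd
      simp only [List.mem_cons]
      constructor
      · rintro (e | e)
        · exact absurd e (by omega)
        · exact e
      · tauto
    have pb' : ¬ ((b - 1) ∈ (b :: t)) := by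
      simp only [List.mem_cons]
      rintro (e | e)
      · omega
      · exact absurd (hbt _ e) (by omega)
    have hIH := ih b h'
    simp only [List.countP_cons, List.contains_eq_mem, adjN] at hIH ⊢
    have ht : t.countP (fun d => !decide ((d - 1) ∈ (a :: b :: t)))
        = t.countP (fun d => !decide ((d - 1) ∈ (b :: t))) := by
      apply List.countP_congr
      intro d hd
      simp [pt d hd]
    rw [ht]
    simp only [pa, pb', pb] at hIH ⊢
    by_cases hb : b = a + 1
    · simp [hb] at hIH ⊢
      omega
    · simp [hb] at hIH ⊢
      omega

theorem main_eq (ticket : List Int) : decade_group_count ticket = decade_group_count_alt ticket := by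
  unfold decade_group_count decade_group_count_alt get_decades
  set s : PySem.Set Int := PySem.Set.ofList (ticket.map (fun n => PySem.Int.floordiv n 10)) with hs
  set l := PySem.List.sorted s (fun x => x) false with hl
  have hperm : l.Perm s := PySem.List.sorted_perm s (fun x => x) false
  have hB : s.foldl (fun acc d => if !(PySem.Set.contains s (d - 1)) then acc + 1 else acc) 0
      = ((s.countP (fun d => !(PySem.Set.contains s (d - 1)))) : Int) := by
    rw [PySem.List.foldl_if_add_one (fun d => !(PySem.Set.contains s (d - 1))) s 0]
    ring
  rw [hB]
  have hcnt : s.countP (fun d => !(PySem.Set.contains s (d - 1)))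
      = l.countP (fun d => !(l.contains (d - 1))) := by
    rw [← hperm.countP_eq]
    apply List.countP_congr
    intro d _
    simp [PySem.Set.contains, List.contains_eq_mem, PySem.List.mem_sorted, hl]
  rw [hcnt]
  cases hle : l with
  | nil => simp
  | cons a t =>
    have hpw : (a :: t).Pairwise (· < ·) := by
      rw [← hle, hl, hs]
      exact PySem.List.sorted_ofList_pairwise_lt _
    rw [if_neg (by simp)]
    have hA := PySem.List.foldl_ite_add_one
      (fun i => ¬ PySem.List.pyGetD (a :: t) i 0 = PySem.List.pyGetD (a :: t) (i - 1) 0 + 1)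
      (PySem.List.pyRange 1 ((a :: t).length : Int) 1) 1
    rw [hA, countP_pyRange_adj t a, countP_starts t a hpw]
    push_cast
    ring

-- ===== VERDICT (by name: the statement is the Claim_ definition above) =====
theorem decade_group_count_spec : Claim_equal_decade_group_count := by
  intro ticket _
  exact main_eq ticket
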